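-- pv_equiv track=rewrite | github.com/Ahmet-Acik/master_python | src/loops.py | while_loop_with_continue
-- ===== SOURCE A (Python) =====
-- def while_loop_with_continue(limit):
--     """
--     Uses the continue statement to skip the current iteration and continue with the next iteration.
--     """
--     result = []
--     i = 0
--     while i < limit:
--         i += 1
--         if i == 3:
--             continue
--         result.append(i)
--     return result
-- ===== SOURCE B (Python) =====
-- def while_loop_with_continue(limit):
--     result = list(range(1, limit + 1))
--     if limit >= 3:
--         result.remove(3)
--     return result
-- ===== Notes on version B (the rewrite author's own statement) =====
-- stated objective: simpler
-- what changed: Replaces the per-iteration while/continue loop with building the whole range 1..limit at once and doing one conditional removal of 3.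
import Mathlib
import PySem

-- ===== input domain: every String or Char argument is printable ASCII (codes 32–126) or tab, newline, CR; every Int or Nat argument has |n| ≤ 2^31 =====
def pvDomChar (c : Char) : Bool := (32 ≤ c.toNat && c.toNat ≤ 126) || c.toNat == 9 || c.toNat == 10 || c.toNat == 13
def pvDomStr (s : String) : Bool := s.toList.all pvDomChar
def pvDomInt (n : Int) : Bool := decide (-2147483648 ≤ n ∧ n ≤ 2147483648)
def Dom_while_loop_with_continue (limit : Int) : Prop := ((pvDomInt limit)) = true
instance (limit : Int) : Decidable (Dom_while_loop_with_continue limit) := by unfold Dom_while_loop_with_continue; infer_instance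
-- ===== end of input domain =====

-- B builds the whole list range(1, limit+1) at once and conditionally removes 3, instead of A's while loop with continue; objective: simpler.

-- ===== PORT A =====
-- the while loop runs exactly limit.toNat times (i goes 0 → limit by 1s), so that is the fuel
def pvLoopA : Nat → Int → List Int → List Int
  | 0, _, acc => acc
  | n + 1, i, acc =>
    let i' := i + 1
    if i' = 3 then pvLoopA n i' acc else pvLoopA n i' (acc ++ [i'])

def while_loop_with_continue (limit : Int) : List Int :=
  pvLoopA limit.toNat 0 []

-- ===== PORT B =====
def while_loop_with_continue_alt (limit : Int) : List Int :=
  let result := PySem.List.pyRange 1 (limit + 1) 1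
  if 3 ≤ limit then (PySem.List.remove? result 3).getD result  -- guard guarantees 3 ∈ result, so remove? never 'raises'
  else result

-- ===== PRECONDITION & SPEC =====
def Spec_while_loop_with_continue (limit : Int) (out : List Int) : Prop := out = while_loop_with_continue_alt limit
instance (limit : Int) (out : List Int) : Decidable (Spec_while_loop_with_continue limit out) := by unfold Spec_while_loop_with_continue; infer_instance

-- ===== CLAIM (what is proved, stated in full; the proofs are below) =====
def Claim_equal_while_loop_with_continue : Prop := ∀ (limit : Int), Dom_while_loop_with_continue limit → Spec_while_loop_with_continue limit (while_loop_with_continue limit)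

-- ===== LEMMAS AND PROOFS =====

theorem pvLoopA_spec (n : Nat) : ∀ (i : Int) (acc : List Int),
    pvLoopA n i acc = acc ++ (PySem.List.pyRange (i + 1) (i + n + 1) 1).filter (· ≠ 3) := by
  induction n with
  | zero =>
    intro i acc
    rw [PySem.List.pyRange_one_eq_nil (by push_cast; omega : (i + ((0:Nat):Int) + 1) ≤ i + 1)]
    simp [pvLoopA]
  | succ n ih =>
    intro i acc
    rw [show (i + (n + 1 : Nat) + 1 : Int) = (i + 1) + (n : Nat) + 1 by push_cast; ring] at *
    rw [PySem.List.pyRange_one_cons (by omega : (i + 1 : Int) < (i + 1) + (n : Nat) + 1)]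
    simp only [pvLoopA, List.filter_cons]
    by_cases h : (i + 1 : Int) = 3
    · simp [h, ih]
    · simp [h, ih, List.append_assoc]

theorem filterA_eq_alt (limit : Int) :
    (PySem.List.pyRange 1 (limit + 1) 1).filter (· ≠ 3) = while_loop_with_continue_alt limit := by
  unfold while_loop_with_continue_alt
  by_cases h : (3 : Int) ≤ limit
  · have hmem : (3 : Int) ∈ PySem.List.pyRange 1 (limit + 1) 1 := by
      rw [PySem.List.mem_pyRange_one]; omega
    rw [if_pos h, PySem.List.remove?_eq_some_erase _ _ hmem, Option.getD_some,
      List.Nodup.erase_eq_filter (PySem.List.nodup_pyRange_one _ _)]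
    exact List.filter_congr (fun a _ => by by_cases h : a = 3 <;> simp [h])
  · rw [if_neg h, List.filter_eq_self]
    intro a ha
    rw [PySem.List.mem_pyRange_one] at ha
    simp only [ne_eq, decide_eq_true_eq]
    omega

-- ===== VERDICT (by name: the statement is the Claim_ definition above) =====
theorem while_loop_with_continue_spec : Claim_equal_while_loop_with_continue := by
  intro limit _
  unfold Spec_while_loop_with_continue while_loop_with_continue
  rw [pvLoopA_spec, ← filterA_eq_alt limit]
  by_cases h : 0 ≤ limit
  · rw [show (0 + (limit.toNat : Int) + 1) = limit + 1 by omega]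
    simp
  · rw [Int.toNat_of_nonpos (by omega)]
    simp [PySem.List.pyRange_one_eq_nil (by omega : (limit + 1 : Int) ≤ 1)]
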